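-- pv_equiv track=rewrite | github.com/hansie4/hans-aoc | 2023/Day 12/main.py | splitStringUp
-- ===== SOURCE A (Python) =====
-- def insertIndex(originalString: str, index: int, newValue: str):
--     return originalString[:index] + newValue + originalString[index:]
--
-- def splitStringUp(inputStringNotReady: str):
--     indexesToInsertAt = list()
--
--     inputString = inputStringNotReady.replace(".", " ")
--
--     for x in range(len(inputString) - 1):
--         v1 = inputString[x]
--         v2 = inputString[x + 1]
--
--         if (v1 == "?" and v2 == "#") or (v1 == "#" and v2 == "?"):
--             indexesToInsertAt.append(x + 1)
--
--     indexesToInsertAt.sort()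
--
--     newString = inputString
--
--     for x in indexesToInsertAt[::-1]:
--         newString = insertIndex(newString, x, " ")
--
--     return newString.split()
-- ===== SOURCE B (Python) =====
-- def splitStringUp(inputStringNotReady: str):
--     s = inputStringNotReady.replace(".", " ")
--     result = []
--     cur = ""
--     for c in s:
--         if c.isspace():
--             if cur:
--                 result.append(cur)
--                 cur = ""
--         else:
--             if cur and ((cur[-1] == "?" and c == "#") or (cur[-1] == "#" and c == "?")):
--                 result.append(cur)
--                 cur = ""
--             cur += c
--     if cur:
--         result.append(cur)
--     return result
-- ===== Notes on version B (the rewrite author's own statement) =====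
-- stated objective: simpler
-- what changed: Replaces A's pipeline (collect boundary indices, sort, re-insert spaces right-to-left by string slicing, then split) with a single left-to-right scan that builds the tokens directly, flushing the current token at whitespace and at ?/# adjacencies.
import Mathlib
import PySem

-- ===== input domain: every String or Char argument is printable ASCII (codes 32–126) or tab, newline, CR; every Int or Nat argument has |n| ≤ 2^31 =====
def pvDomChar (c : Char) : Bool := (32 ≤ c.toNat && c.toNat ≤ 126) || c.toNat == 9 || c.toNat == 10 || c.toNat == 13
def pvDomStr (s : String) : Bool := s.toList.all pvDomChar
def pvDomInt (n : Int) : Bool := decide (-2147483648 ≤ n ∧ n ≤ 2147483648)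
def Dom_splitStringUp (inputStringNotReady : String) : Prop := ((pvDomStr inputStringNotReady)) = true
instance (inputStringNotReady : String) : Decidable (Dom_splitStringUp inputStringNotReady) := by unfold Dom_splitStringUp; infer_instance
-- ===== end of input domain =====

-- B replaces A's collect-indices / sort / right-to-left space-insertion / split pipeline by one
-- direct left-to-right grouping scan (objective: simpler, one pass instead of four).

-- ===== PORT A =====
-- A's helper: originalString[:index] + newValue + originalString[index:], on code points
def insertIndex (originalString : List Char) (index : Int) (newValue : List Char) : List Char :=
  PySem.List.slice originalString none (some index) ++ newValue ++
    PySem.List.slice originalString (some index) none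

def splitStringUp (inputStringNotReady : String) : List String :=
  let inputString := PySem.Str.replace inputStringNotReady "." " "
  let indexesToInsertAt : List Int :=
    (PySem.List.pyRange 0 (PySem.Str.len inputString - 1) 1).foldl
      (fun acc x =>
        let v1 := PySem.List.pyGetD inputString.toList x ' '
        let v2 := PySem.List.pyGetD inputString.toList (x + 1) ' '
        if (v1 == '?' && v2 == '#') || (v1 == '#' && v2 == '?') then acc ++ [x + 1] else acc)
      []
  let indexesSorted := PySem.List.sorted indexesToInsertAt (fun v => v)
  let newString :=
    ((PySem.List.slice? indexesSorted none none (-1)).getD []).foldl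
      (fun ns x => insertIndex ns x [' ']) inputString.toList
  (PySem.Chars.split₀ newString).map String.ofList

-- ===== PORT B =====
-- Source B's loop over the characters; state = (remaining chars, cur, result); cur is a Python str
def splitStringUpGo : List Char → List Char → List String → List String
  | [], cur, result => if cur.isEmpty then result else result ++ [String.ofList cur]
  | c :: rest, cur, result =>
    if PySem.Chars.isspace c then
      if cur.isEmpty then splitStringUpGo rest [] result
      else splitStringUpGo rest [] (result ++ [String.ofList cur])
    else
      if !cur.isEmpty &&
          ((PySem.List.pyGetD cur (-1) ' ' == '?' && c == '#') ||
           (PySem.List.pyGetD cur (-1) ' ' == '#' && c == '?')) then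
        splitStringUpGo rest [c] (result ++ [String.ofList cur])
      else splitStringUpGo rest (cur ++ [c]) result

def splitStringUp_alt (inputStringNotReady : String) : List String :=
  splitStringUpGo (PySem.Str.replace inputStringNotReady "." " ").toList [] []

-- ===== PRECONDITION & SPEC =====
def Spec_splitStringUp (inputStringNotReady : String) (out : List String) : Prop :=
  out = splitStringUp_alt inputStringNotReady
instance (inputStringNotReady : String) (out : List String) :
    Decidable (Spec_splitStringUp inputStringNotReady out) := by
  unfold Spec_splitStringUp; infer_instance

-- ===== CLAIM (what is proved, stated in full; the proofs are below) =====
def Claim_equal_splitStringUp : Prop :=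
  ∀ (inputStringNotReady : String), Dom_splitStringUp inputStringNotReady →
    Spec_splitStringUp inputStringNotReady (splitStringUp inputStringNotReady)


-- ===== LEMMAS AND PROOFS =====

-- a ?/# adjacency
def pvBdry (a b : Char) : Bool := (a == '?' && b == '#') || (a == '#' && b == '?')

def pvPB : Option Char → Char → Bool
  | some a, c => pvBdry a c
  | none, _ => false

-- the string with a space inserted at every boundary; p = previous character (if any)
def pvExplP : Option Char → List Char → List Char
  | _, [] => []
  | p, c :: r => (if pvPB p c then [' ', c] else [c]) ++ pvExplP (some c) r

-- the boundary positions A collects, as naturals (ascending)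
def pvBidx (t : List Char) : List Nat :=
  ((List.range (t.length - 1)).filter
      (fun k => pvBdry (t.getD k ' ') (t.getD (k + 1) ' '))).map (· + 1)

-- A's right-to-left insertion loop, as a foldr over the ascending index list
def pvFold (js : List Nat) (t : List Char) : List Char :=
  List.foldr (fun (k : Nat) (ns : List Char) => insertIndex ns ((k : Nat) : Int) [' ']) t js

theorem go_nil (cur : List Char) (acc : List (List Char)) :
    PySem.Chars.split₀.go [] cur acc =
      if cur.isEmpty then acc.reverse else (cur.reverse :: acc).reverse := by
  rw [PySem.Chars.split₀.go]

theorem go_space (c : Char) (rest cur : List Char) (acc : List (List Char))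
    (h : PySem.Chars.isspace c = true) :
    PySem.Chars.split₀.go (c :: rest) cur acc =
      if cur.isEmpty then PySem.Chars.split₀.go rest [] acc
      else PySem.Chars.split₀.go rest [] (cur.reverse :: acc) := by
  rw [PySem.Chars.split₀.go]; simp [h]

theorem go_char (c : Char) (rest cur : List Char) (acc : List (List Char))
    (h : PySem.Chars.isspace c = false) :
    PySem.Chars.split₀.go (c :: rest) cur acc = PySem.Chars.split₀.go rest (c :: cur) acc := by
  rw [PySem.Chars.split₀.go]; simp [h]

theorem insertIndex_natCast (l : List Char) (k : Nat) (v : List Char) :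
    insertIndex l (k : Int) v = l.take k ++ v ++ l.drop k := by
  simp [insertIndex, PySem.List.slice_to_natCast, PySem.List.slice_from_natCast]

theorem insertIndex_cons_succ (a : Char) (w : List Char) (k : Nat) (v : List Char) :
    insertIndex (a :: w) (((k + 1 : Nat)) : Int) v = a :: insertIndex w (k : Int) v := by
  rw [insertIndex_natCast (a :: w) (k + 1) v, insertIndex_natCast w k v]
  simp

theorem pvFold_map_succ (js : List Nat) (a : Char) (w : List Char) :
    pvFold (js.map (· + 1)) (a :: w) = a :: pvFold js w := by
  induction js with
  | nil => rfl
  | cons j js ih =>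
    simp only [pvFold, List.map_cons, List.foldr_cons] at *
    rw [ih, insertIndex_cons_succ]

theorem pvBidx_cons (a b : Char) (r : List Char) :
    pvBidx (a :: b :: r) = (if pvBdry a b then [1] else []) ++ (pvBidx (b :: r)).map (· + 1) := by
  unfold pvBidx
  have h1 : (a :: b :: r).length - 1 = r.length + 1 := by simp
  have h2 : (b :: r).length - 1 = r.length := by simp
  rw [h1, h2, List.range_succ_eq_map, List.filter_cons, List.filter_map]
  simp only [Function.comp_def, Nat.succ_eq_add_one, List.getD_cons_succ, List.getD_cons_zero]
  by_cases hb : pvBdry a b <;> simp [hb, List.map_map, Function.comp_def]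

theorem pvFold_bidx_cons : ∀ (u : List Char) (a : Char),
    pvFold (pvBidx (a :: u)) (a :: u) = a :: pvExplP (some a) u := by
  intro u
  induction u with
  | nil => intro a; simp [pvBidx, pvFold, pvExplP]
  | cons b r ih =>
    intro a
    rw [pvBidx_cons]
    unfold pvFold
    rw [List.foldr_append]
    rw [show List.foldr (fun (k : Nat) (ns : List Char) => insertIndex ns ((k : Nat) : Int) [' '])
          (a :: b :: r) ((pvBidx (b :: r)).map (· + 1)) =
        pvFold ((pvBidx (b :: r)).map (· + 1)) (a :: b :: r) from rfl]
    rw [pvFold_map_succ, ih]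
    by_cases h : pvBdry a b
    · rw [if_pos h]
      simp only [List.foldr_cons, List.foldr_nil]
      rw [insertIndex_natCast]
      simp [pvExplP, pvPB, h]
    · rw [if_neg h]
      simp [pvExplP, pvPB, h]

theorem pvFold_bidx (t : List Char) : pvFold (pvBidx t) t = pvExplP none t := by
  cases t with
  | nil => rfl
  | cons a u => rw [pvFold_bidx_cons]; simp [pvExplP, pvPB]

theorem pvBdry_right (a c : Char) (h : PySem.Chars.isspace c = true) : pvBdry a c = false := by
  have h1 : (c == '#') = false := by
    cases hc : c == '#' with
    | false => rfl
    | true => rw [beq_iff_eq] at hc; subst hc; exact absurd h (by decide)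
  have h2 : (c == '?') = false := by
    cases hc : c == '?' with
    | false => rfl
    | true => rw [beq_iff_eq] at hc; subst hc; exact absurd h (by decide)
  simp [pvBdry, h1, h2]

theorem pvBdry_left (a c : Char) (h : PySem.Chars.isspace a = true) : pvBdry a c = false := by
  have h1 : (a == '#') = false := by
    cases hc : a == '#' with
    | false => rfl
    | true => rw [beq_iff_eq] at hc; subst hc; exact absurd h (by decide)
  have h2 : (a == '?') = false := by
    cases hc : a == '?' with
    | false => rfl
    | true => rw [beq_iff_eq] at hc; subst hc; exact absurd h (by decide)
  simp [pvBdry, h1, h2]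

theorem splitStringUpGo_eq : ∀ (u : List Char) (p : Option Char) (cur : List Char)
    (res : List String),
    (cur = [] → ∀ c, pvPB p c = false) →
    (cur ≠ [] → p = cur.getLast?) →
    splitStringUpGo u cur res =
      (PySem.Chars.split₀.go (pvExplP p u) cur.reverse
        ((res.map String.toList).reverse)).map String.ofList := by
  intro u
  induction u with
  | nil =>
    intro p cur res _ _
    rw [show pvExplP p [] = [] from rfl, go_nil]
    cases cur with
    | nil => simp [splitStringUpGo, Function.comp_def, String.ofList_toList]
    | cons x xs => simp [splitStringUpGo, Function.comp_def, String.ofList_toList]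
  | cons c r ih =>
    intro p cur res h1 h2
    by_cases hs : PySem.Chars.isspace c = true
    · have hpb : pvPB p c = false := by
        cases p with
        | none => rfl
        | some a => exact pvBdry_right a c hs
      rw [show pvExplP p (c :: r) = (if pvPB p c then [' ', c] else [c]) ++ pvExplP (some c) r
            from rfl,
        if_neg (by simp [hpb]), List.singleton_append, go_space c _ _ _ hs]
      cases cur with
      | nil =>
        rw [splitStringUpGo]
        simp only [hs, List.isEmpty_nil, List.reverse_nil, if_true, ite_true]
        exact ih (some c) [] res (fun _ d => pvBdry_left c d hs) (fun h => absurd rfl h)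
      | cons x xs =>
        rw [splitStringUpGo]
        simp only [hs, List.isEmpty_cons, List.isEmpty_reverse, if_true, ite_true,
          Bool.false_eq_true, if_false, ite_false, List.reverse_reverse]
        rw [ih (some c) [] (res ++ [String.ofList (x :: xs)])
              (fun _ d => pvBdry_left c d hs) (fun h => absurd rfl h)]
        simp [String.toList_ofList]
    · have hs' : PySem.Chars.isspace c = false := by simpa using hs
      by_cases hcur : cur = []
      · subst hcur
        have hpb : pvPB p c = false := h1 rfl c
        rw [show pvExplP p (c :: r) = (if pvPB p c then [' ', c] else [c]) ++ pvExplP (some c) r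
              from rfl,
          if_neg (by simp [hpb]), List.singleton_append, go_char c _ _ _ hs']
        rw [splitStringUpGo]
        simp only [hs', List.isEmpty_nil, Bool.not_true, Bool.false_and, Bool.false_eq_true,
          if_false, ite_false, List.nil_append, List.reverse_nil]
        exact ih (some c) [c] res (fun h => absurd h (by simp)) (fun _ => rfl)
      · have hp : p = some (cur.getLast hcur) := by
          rw [h2 hcur, List.getLast?_eq_getLast hcur]
        have hgetD : PySem.List.pyGetD cur (-1) ' ' = cur.getLast hcur :=
          PySem.List.pyGetD_neg_one cur ' ' hcur
        have hre : cur.reverse.isEmpty = false := by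
          rw [List.isEmpty_reverse]; cases cur with
          | nil => exact absurd rfl hcur
          | cons x xs => rfl
        by_cases hb : pvBdry (cur.getLast hcur) c = true
        · have hpb : pvPB p c = true := by rw [hp]; exact hb
          have htest : (!cur.isEmpty &&
              ((PySem.List.pyGetD cur (-1) ' ' == '?' && c == '#') ||
               (PySem.List.pyGetD cur (-1) ' ' == '#' && c == '?'))) = true := by
            rw [hgetD]
            unfold pvBdry at hb
            rw [hb]
            cases cur with
            | nil => exact absurd rfl hcur
            | cons x xs => rfl
          rw [show pvExplP p (c :: r) = (if pvPB p c then [' ', c] else [c]) ++ pvExplP (some c) r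
                from rfl,
            if_pos (by simp [hpb])]
          simp only [List.cons_append, List.nil_append]
          rw [go_space ' ' _ _ _ (by decide)]
          rw [if_neg (by simp [hre])]
          rw [List.reverse_reverse, go_char c _ _ _ hs']
          rw [splitStringUpGo]
          simp only [hs', Bool.false_eq_true, if_false, ite_false, htest, if_true, ite_true]
          rw [ih (some c) [c] (res ++ [String.ofList cur])
                (fun h => absurd h (by simp)) (fun _ => rfl)]
          simp [String.toList_ofList]
        · have hb' : pvBdry (cur.getLast hcur) c = false := by simpa using hb
          have hpb : pvPB p c = false := by rw [hp]; exact hb'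
          have htest : (!cur.isEmpty &&
              ((PySem.List.pyGetD cur (-1) ' ' == '?' && c == '#') ||
               (PySem.List.pyGetD cur (-1) ' ' == '#' && c == '?'))) = false := by
            rw [hgetD]
            unfold pvBdry at hb'
            rw [hb', Bool.and_false]
          rw [show pvExplP p (c :: r) = (if pvPB p c then [' ', c] else [c]) ++ pvExplP (some c) r
                from rfl,
            if_neg (by simp [hpb]), List.singleton_append, go_char c _ _ _ hs']
          rw [splitStringUpGo]
          simp only [hs', Bool.false_eq_true, if_false, ite_false, htest]
          rw [ih (some c) (cur ++ [c]) res
                (fun h => absurd h (by simp)) (fun _ => (List.getLast?_concat).symm)]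
          rw [List.reverse_append]
          simp

theorem splitStringUp_eq_alt (s : String) : splitStringUp s = splitStringUp_alt s := by
  simp only [splitStringUp, splitStringUp_alt]
  rw [PySem.Str.len_eq]
  rw [PySem.List.pyRange_one, List.foldl_map, PySem.List.foldl_append_if]
  rw [show (((((PySem.Str.replace s "." " ").toList.length : Int)) - 1 - 0).toNat) =
        (PySem.Str.replace s "." " ").toList.length - 1 from by omega]
  rw [show (List.map (fun k : Nat => (0 : Int) + (k : Int) + 1)
        (List.filter
          (fun k : Nat =>
            (PySem.List.pyGetD (PySem.Str.replace s "." " ").toList ((0 : Int) + (k : Int)) ' ' == '?' &&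
             PySem.List.pyGetD (PySem.Str.replace s "." " ").toList ((0 : Int) + (k : Int) + 1) ' ' == '#') ||
            (PySem.List.pyGetD (PySem.Str.replace s "." " ").toList ((0 : Int) + (k : Int)) ' ' == '#' &&
             PySem.List.pyGetD (PySem.Str.replace s "." " ").toList ((0 : Int) + (k : Int) + 1) ' ' == '?'))
          (List.range ((PySem.Str.replace s "." " ").toList.length - 1)))) =
      (pvBidx (PySem.Str.replace s "." " ").toList).map (fun k : Nat => (k : Int)) from ?_]
  · simp only [List.nil_append]
    rw [PySem.List.sorted_eq_of_perm_of_pairwise_lt _ _ _ (List.Perm.refl _) ?_]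
    · rw [PySem.List.slice?_none_none_neg_one, Option.getD_some]
      rw [List.foldl_reverse, List.foldr_map]
      rw [show (List.foldr (fun (x : Nat) (y : List Char) => insertIndex y ((x : Nat) : Int) [' '])
            (PySem.Str.replace s "." " ").toList (pvBidx (PySem.Str.replace s "." " ").toList)) =
          pvFold (pvBidx (PySem.Str.replace s "." " ").toList)
            (PySem.Str.replace s "." " ").toList from rfl]
      rw [pvFold_bidx]
      rw [splitStringUpGo_eq _ none [] [] (fun _ _ => rfl) (fun h => absurd rfl h)]
      rfl
    · -- Pairwise (· < ·) on the cast index list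
      have hpw : List.Pairwise (fun x y : Int => x < y)
          (List.map (fun k : Nat => (k : Int)) (pvBidx (PySem.Str.replace s "." " ").toList)) := by
        unfold pvBidx
        rw [List.map_map]
        exact ((List.pairwise_lt_range).filter _).map _ (fun a b hab => by
          simp only [Function.comp_apply]
          omega)
      exact List.Pairwise.imp (fun h => h) hpw
  · -- the collected index list is the cast of pvBidx
    unfold pvBidx
    rw [List.map_map]
    rw [List.filter_congr (fun k hk => ?_)]
    · exact List.map_congr_left (fun k hk => by simp only [Function.comp_apply]; push_cast; omega)
    · simp only [zero_add]
      rw [show ((k : Int) + 1) = (((k + 1 : Nat)) : Int) from by push_cast; ring]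
      simp only [PySem.List.pyGetD_natCast]
      rfl

-- ===== VERDICT (by name: the statement is the Claim_ definition above) =====
theorem splitStringUp_spec : Claim_equal_splitStringUp := by
  intro s _
  unfold Spec_splitStringUp
  exact splitStringUp_eq_alt s
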